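-- pv_equiv track=rewrite | github.com/mihneagiurgea/pysandbox | topcoder/GUMIAndSongsDiv1.py | maxSongs
-- ===== SOURCE A (Python) =====
-- def maxSongs(duration, tone, T):
--     """
--     >>> obj = GUMIAndSongsDiv1()
--     >>> obj.maxSongs((3, 5, 4, 11), (2, 1, 3, 1), 17)
--     3
--     >>> obj.maxSongs((100, 200, 300), (1, 2, 3), 99)
--     0
--     """
--     N = len(duration)
--
--     songs = [(duration[i], tone[i]) for i in range(N)]
--     songs.sort(key=lambda s: s[1])
--
--     # Use T+1 as +inf.
--     inf = T+1
--
--     D = [[inf] * (N+1) for _ in range(N+1)]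
--
--     max_songs = 0
--
--     D[0][0] = 0
--     D[0][1] = songs[0][0]
--
--     for i in range(1, N):
--         D[i][0] = 0
--         for j in range(1, N+1):
--             cost = inf
--             for k in range(i):
--                 cost_k = D[k][j-1]
--                 if j > 1:
--                     # Not the first song being played.
--                     cost_k += songs[i][1] - songs[k][1]
--                 cost = min(cost, cost_k)
--             D[i][j] = cost + songs[i][0]
--             if D[i][j] <= T:
--                 max_songs = max(max_songs, j)
--
--     return max_songs
-- ===== SOURCE B (Python) =====
-- def maxSongs(duration, tone, T):
--     # O(N^2): same DP as the cubic version, but the inner min over previous rows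
--     # is maintained incrementally as M[j-1] = min_k (D[k][j] - tone_k).
--     N = len(duration)
--     songs = sorted(zip(duration, tone), key=lambda s: s[1])
--     inf = T + 1
--     d0, t0 = songs[0]
--     M = [d0 - t0] + [inf - t0] * (N - 1)
--     best = 0
--     for i in range(1, N):
--         di, ti = songs[i]
--         row = [di + min(inf, 0 if j == 1 else ti + M[j - 2]) for j in range(1, N + 1)]
--         for j in range(1, N + 1):
--             if row[j - 1] <= T:
--                 best = max(best, j)
--         M = [min(M[j - 1], row[j - 1] - ti) for j in range(1, N + 1)]
--     return best
-- ===== Notes on version B (the rewrite author's own statement) =====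
-- stated objective: faster
-- what changed: The O(N) inner scan over all previous DP rows is replaced by an incrementally maintained prefix-minimum array M[j] = min_k (D[k][j] - tone_k), so each cell is computed in O(1) and the DP drops from O(N^3) to O(N^2).
import Mathlib
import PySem

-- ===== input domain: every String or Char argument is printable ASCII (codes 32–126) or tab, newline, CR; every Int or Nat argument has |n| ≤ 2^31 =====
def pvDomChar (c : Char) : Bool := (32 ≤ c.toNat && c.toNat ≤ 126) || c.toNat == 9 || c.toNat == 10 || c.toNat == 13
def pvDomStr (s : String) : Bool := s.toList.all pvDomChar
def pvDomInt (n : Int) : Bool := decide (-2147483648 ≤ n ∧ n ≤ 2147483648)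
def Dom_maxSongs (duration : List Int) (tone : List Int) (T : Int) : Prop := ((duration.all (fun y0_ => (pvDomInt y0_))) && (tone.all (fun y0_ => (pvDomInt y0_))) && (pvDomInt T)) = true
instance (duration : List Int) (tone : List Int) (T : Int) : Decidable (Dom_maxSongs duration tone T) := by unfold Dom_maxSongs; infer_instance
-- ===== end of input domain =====

-- B replaces A's O(N) inner scan over previous DP rows by a maintained prefix-minimum
-- array M[j] = min_k (D[k][j] - tone_k), making the DP O(N^2) instead of O(N^3).

-- ===== PORT A =====
-- cost = inf; for k in range(i): cost = min(cost, D[k][j-1] + (songs[i][1]-songs[k][1] if j>1 else 0))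
def aInner (songs : List (Int × Int)) (rows : List (List Int)) (inf i j : Int) : Int :=
  (PySem.List.pyRange 0 i).foldl
    (fun cost k =>
      min cost (PySem.List.pyGetD (PySem.List.pyGetD rows k []) (j - 1) 0
        + (if 1 < j then (PySem.List.pyGetD songs i ((0 : Int), (0 : Int))).2
                           - (PySem.List.pyGetD songs k ((0 : Int), (0 : Int))).2
           else 0)))
    inf

-- one iteration of A's outer loop 'for i in range(1, N)': builds row i of D (D[i][0] = 0,
-- then D[i][j] = cost + songs[i][0] for j in range(1, N+1)) and updates max_songs
def aStep (songs : List (Int × Int)) (T inf N : Int)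
    (s : List (List Int) × Int) (i : Int) : List (List Int) × Int :=
  let res :=
    (PySem.List.pyRange 1 (N + 1)).foldl
      (fun (rm : List Int × Int) j =>
        (rm.1 ++ [aInner songs s.1 inf i j + (PySem.List.pyGetD songs i ((0 : Int), (0 : Int))).1],
         if aInner songs s.1 inf i j + (PySem.List.pyGetD songs i ((0 : Int), (0 : Int))).1 ≤ T
         then max rm.2 j else rm.2))
      ([0], s.2)
  (s.1 ++ [res.1], res.2)

def maxSongs (duration : List Int) (tone : List Int) (T : Int) : Int :=
  let N : Int := duration.length
  -- songs = sorted([(duration[i], tone[i]) for i in range(N)], key=lambda s: s[1]);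
  -- exact when tone covers duration's indices (Pre_); Python raises IndexError otherwise
  let songs := PySem.List.sorted
    ((PySem.List.pyRange 0 N).map
      (fun i => (PySem.List.pyGetD duration i 0, PySem.List.pyGetD tone i 0)))
    (fun s => s.2)
  let inf := T + 1
  -- row 0 of D: [0, songs[0][0], inf, ..., inf]  (Python raises IndexError on songs[0] when N = 0, outside Pre_)
  let row0 : List Int :=
    0 :: (PySem.List.pyGetD songs 0 ((0 : Int), (0 : Int))).1 :: List.replicate (duration.length - 1) inf
  ((PySem.List.pyRange 1 N).foldl (aStep songs T inf N) ([row0], 0)).2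

-- ===== PORT B =====
-- one iteration of B's loop: row i from the prefix minima M, then best and M updates
def bStep (songs : List (Int × Int)) (T inf N : Int)
    (s : List Int × Int) (i : Int) : List Int × Int :=
  let di := (PySem.List.pyGetD songs i ((0 : Int), (0 : Int))).1
  let ti := (PySem.List.pyGetD songs i ((0 : Int), (0 : Int))).2
  let row := (PySem.List.pyRange 1 (N + 1)).map
    (fun j => di + min inf (if j = 1 then 0 else ti + PySem.List.pyGetD s.1 (j - 2) 0))
  let best := (PySem.List.pyRange 1 (N + 1)).foldl
    (fun b j => if PySem.List.pyGetD row (j - 1) 0 ≤ T then max b j else b) s.2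
  let M := (PySem.List.pyRange 1 (N + 1)).map
    (fun j => min (PySem.List.pyGetD s.1 (j - 1) 0) (PySem.List.pyGetD row (j - 1) 0 - ti))
  (M, best)

def maxSongs_alt (duration : List Int) (tone : List Int) (T : Int) : Int :=
  let N : Int := duration.length
  let songs := PySem.List.sorted (duration.zip tone) (fun s => s.2)
  let inf := T + 1
  let d0 := (PySem.List.pyGetD songs 0 ((0 : Int), (0 : Int))).1
  let t0 := (PySem.List.pyGetD songs 0 ((0 : Int), (0 : Int))).2
  -- M = [d0 - t0] + [inf - t0] * (N - 1)
  let M0 : List Int := (d0 - t0) :: List.replicate (duration.length - 1) (inf - t0)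
  ((PySem.List.pyRange 1 N).foldl (bStep songs T inf N) (M0, 0)).2

-- ===== PRECONDITION & SPEC =====
-- Pre_ is exactly where Python A returns: on [] it raises IndexError at songs[0],
-- and when tone is shorter than duration it raises IndexError at tone[i].
def Pre_maxSongs (duration : List Int) (tone : List Int) (T : Int) : Prop :=
  duration ≠ [] ∧ duration.length ≤ tone.length
instance (duration : List Int) (tone : List Int) (T : Int) : Decidable (Pre_maxSongs duration tone T) := by
  unfold Pre_maxSongs; infer_instance

def pvWitness_maxSongs : List Int × List Int × Int := ([3, 5, 4, 11], [2, 1, 3, 1], 17)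

def Spec_maxSongs (duration : List Int) (tone : List Int) (T : Int) (out : Int) : Prop := out = maxSongs_alt duration tone T
instance (duration : List Int) (tone : List Int) (T : Int) (out : Int) : Decidable (Spec_maxSongs duration tone T out) := by unfold Spec_maxSongs; infer_instance

-- ===== CLAIM (what is proved, stated in full; the proofs are below) =====
def Claim_equal_maxSongs : Prop := ∀ (duration : List Int) (tone : List Int) (T : Int), Dom_maxSongs duration tone T → Pre_maxSongs duration tone T → Spec_maxSongs duration tone T (maxSongs duration tone T)

-- ===== LEMMAS AND PROOFS =====

-- minimum of v 0, ..., v (i-1) (as A's inner loop folds it), for i ≥ 1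
def pvMinFrom (v : Nat → Int) (i : Nat) : Int :=
  (List.range i).foldl (fun c k => min c (v k)) (v 0)

-- D[k][j] - tone_k, the quantity whose prefix minimum B maintains
def pvVal (songs : List (Int × Int)) (rows : List (List Int)) (jn k : Nat) : Int :=
  (rows.getD k []).getD (jn + 1) 0 - (PySem.List.pyGetD songs (k : Int) ((0 : Int), (0 : Int))).2

-- the relation between A's state (rows of D, best) and B's state (M, best)
def pvInv (songs : List (Int × Int)) (Nn i : Nat) (rows : List (List Int)) (M : List Int) : Prop :=
  rows.length = i ∧
  (∀ k, k < i → (rows.getD k []).getD 0 0 = 0) ∧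
  (∀ jn, jn < Nn → M.getD jn 0 = pvMinFrom (pvVal songs rows jn) i)

lemma pvFoldlMinMin (f : Nat → Int) (l : List Nat) :
    ∀ a b : Int, l.foldl (fun c k => min c (f k)) (min a b) = min a (l.foldl (fun c k => min c (f k)) b) := by
  induction l with
  | nil => intro a b; rfl
  | cons x t ih =>
    intro a b
    simp only [List.foldl_cons]
    rw [min_assoc, ih]

lemma pvFoldlMinAdd (f : Nat → Int) (l : List Nat) :
    ∀ a c : Int, l.foldl (fun x k => min x (f k + c)) (a + c) = l.foldl (fun x k => min x (f k)) a + c := by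
  induction l with
  | nil => intro a c; rfl
  | cons x t ih =>
    intro a c
    simp only [List.foldl_cons]
    rw [min_add_add_right, ih]

lemma pvMinFrom_succ (v : Nat → Int) (i : Nat) :
    pvMinFrom v (i + 1) = min (pvMinFrom v i) (v i) := by
  unfold pvMinFrom
  rw [List.range_succ, List.foldl_append]
  rfl

lemma pvMinFrom_const (c : Int) (i : Nat) : pvMinFrom (fun _ => c) i = c := by
  induction i with
  | zero => rfl
  | succ n ih => rw [pvMinFrom_succ, ih, min_self]

lemma pvMinFrom_congr (v w : Nat → Int) (i : Nat) (hi : 1 ≤ i)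
    (h : ∀ k, k < i → v k = w k) : pvMinFrom v i = pvMinFrom w i := by
  unfold pvMinFrom
  rw [h 0 (by omega)]
  exact PySem.List.foldl_congr_mem _ _ _ _ (fun acc k hk => by rw [h k (List.mem_range.mp hk)])

lemma pvMinFrom_add (v : Nat → Int) (c : Int) (i : Nat) :
    pvMinFrom (fun k => v k + c) i = pvMinFrom v i + c := by
  unfold pvMinFrom
  exact pvFoldlMinAdd v (List.range i) (v 0) c

lemma pvFoldlMinHead (tm : Nat → Int) (i : Nat) (hi : 1 ≤ i) (a : Int) :
    (List.range i).foldl (fun c k => min c (tm k)) a = min a (pvMinFrom tm i) := by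
  obtain ⟨n, rfl⟩ : ∃ n, i = n + 1 := ⟨i - 1, by omega⟩
  unfold pvMinFrom
  rw [List.range_succ_eq_map, List.foldl_cons, List.foldl_cons, min_self, List.foldl_map, List.foldl_map]
  exact pvFoldlMinMin (fun k => tm k.succ) (List.range n) a (tm 0)

-- A's inner loop, in terms of B's prefix minima
lemma pvCell (songs : List (Int × Int)) (T : Int) (Nn i : Nat)
    (rows : List (List Int)) (M : List Int) (hi : 1 ≤ i)
    (h0 : ∀ k, k < i → (rows.getD k []).getD 0 0 = 0)
    (hM : ∀ jn, jn < Nn → M.getD jn 0 = pvMinFrom (pvVal songs rows jn) i)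
    (j : Int) (hj1 : 1 ≤ j) (hj2 : j < (Nn : Int) + 1) :
    aInner songs rows (T + 1) (i : Int) j
      = min (T + 1)
          (if j = 1 then 0
           else (PySem.List.pyGetD songs (i : Int) ((0 : Int), (0 : Int))).2
                  + PySem.List.pyGetD M (j - 2) 0) := by
  unfold aInner
  rw [PySem.List.pyRange_zero_natCast, List.foldl_map]
  by_cases hj : j = 1
  · subst hj
    rw [pvFoldlMinHead (tm := fun k =>
        PySem.List.pyGetD (PySem.List.pyGetD rows ((k : Nat) : Int) []) ((1 : Int) - 1) 0
          + (if (1 : Int) < 1 then (PySem.List.pyGetD songs (i : Int) ((0 : Int), (0 : Int))).2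
               - (PySem.List.pyGetD songs ((k : Nat) : Int) ((0 : Int), (0 : Int))).2 else 0)) i hi]
    rw [pvMinFrom_congr _ (fun _ => 0) i hi ?_, pvMinFrom_const]
    · simp
    · intro k hk
      have h1 : ((1 : Int) - 1) = ((0 : Nat) : Int) := by norm_num
      rw [if_neg (by omega), h1, PySem.List.pyGetD_natCast, PySem.List.pyGetD_natCast,
        h0 k hk]
      simp
  · have hj2' : (1 : Int) < j := by omega
    have hjn : j - 2 = (((j - 2).toNat : Nat) : Int) := by omega
    set jn : Nat := (j - 2).toNat with hjndef
    have hjnlt : jn < Nn := by omega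
    have hj1' : j - 1 = ((jn + 1 : Nat) : Int) := by omega
    rw [pvFoldlMinHead (tm := fun k =>
        PySem.List.pyGetD (PySem.List.pyGetD rows ((k : Nat) : Int) []) (j - 1) 0
          + (if (1 : Int) < j then (PySem.List.pyGetD songs (i : Int) ((0 : Int), (0 : Int))).2
               - (PySem.List.pyGetD songs ((k : Nat) : Int) ((0 : Int), (0 : Int))).2 else 0)) i hi]
    rw [pvMinFrom_congr _
        (fun k => pvVal songs rows jn k + (PySem.List.pyGetD songs (i : Int) ((0 : Int), (0 : Int))).2)
        i hi ?_]
    · rw [pvMinFrom_add, ← hM jn hjnlt, if_neg hj, hjn, PySem.List.pyGetD_natCast M jn 0]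
      congr 1
      ring
    · intro k hk
      rw [if_pos hj2', hj1', PySem.List.pyGetD_natCast, PySem.List.pyGetD_natCast]
      unfold pvVal
      ring

-- one synchronized step of the two loops
lemma pvStepOk (songs : List (Int × Int)) (T : Int) (Nn i : Nat)
    (rows : List (List Int)) (M : List Int) (b : Int) (hi : 1 ≤ i)
    (hInv : pvInv songs Nn i rows M) :
    (aStep songs T (T + 1) (Nn : Int) (rows, b) (i : Int)).2
      = (bStep songs T (T + 1) (Nn : Int) (M, b) (i : Int)).2 ∧
    pvInv songs Nn (i + 1)
      (aStep songs T (T + 1) (Nn : Int) (rows, b) (i : Int)).1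
      (bStep songs T (T + 1) (Nn : Int) (M, b) (i : Int)).1 := by
  obtain ⟨hlen, h0, hM⟩ := hInv
  simp only [aStep, bStep]
  set di := (PySem.List.pyGetD songs (i : Int) ((0 : Int), (0 : Int))).1 with hdi
  set ti := (PySem.List.pyGetD songs (i : Int) ((0 : Int), (0 : Int))).2 with hti
  set f : Int → Int := fun j => di + min (T + 1) (if j = 1 then 0 else ti + PySem.List.pyGetD M (j - 2) 0) with hf
  set rowB : List Int := (PySem.List.pyRange 1 ((Nn : Int) + 1)).map f with hrowB
  rw [PySem.List.foldl_prod_mk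
      (fun r j => r ++ [aInner songs rows (T + 1) (i : Int) j + di])
      (fun bb j => if aInner songs rows (T + 1) (i : Int) j + di ≤ T then max bb j else bb)]
  set rowA : List Int :=
    (PySem.List.pyRange 1 ((Nn : Int) + 1)).foldl
      (fun r j => r ++ [aInner songs rows (T + 1) (i : Int) j + di]) [0] with hrowA
  -- B's row values, at indices in range
  have hrowBval : ∀ j : Int, 1 ≤ j → j < (Nn : Int) + 1 →
      PySem.List.pyGetD rowB (j - 1) 0 = f j := by
    intro j h1 h2
    have hk : j - 1 = (((j - 1).toNat : Nat) : Int) := by omega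
    have hklt : (j - 1).toNat < (((Nn : Int) + 1) - 1).toNat := by omega
    rw [hrowB, hk, PySem.List.pyGetD_map_pyRange_one f 1 ((Nn : Int) + 1) (j - 1).toNat 0 hklt]
    congr 1
    omega
  -- A's cell value = B's row value
  have hcell : ∀ j : Int, 1 ≤ j → j < (Nn : Int) + 1 →
      aInner songs rows (T + 1) (i : Int) j + di = PySem.List.pyGetD rowB (j - 1) 0 := by
    intro j h1 h2
    rw [hrowBval j h1 h2, pvCell songs T Nn i rows M hi h0 hM j h1 h2, hf, ← hti, add_comm]
  have hrowAeq : rowA = [0] ++ (PySem.List.pyRange 1 ((Nn : Int) + 1)).map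
      (fun j => aInner songs rows (T + 1) (i : Int) j + di) := by
    rw [hrowA, PySem.List.foldl_append_singleton_eq_map]
  constructor
  · -- equal best values
    apply PySem.List.foldl_congr_mem
    intro acc j hjmem
    obtain ⟨hj1, hj2⟩ := PySem.List.mem_pyRange_one.mp hjmem
    rw [hcell j hj1 hj2]
  · -- the invariant is preserved
    refine ⟨by simp [hlen], ?_, ?_⟩
    · intro k hk
      by_cases hki : k < i
      · rw [List.getD_append _ _ _ k (by omega)]
        exact h0 k hki
      · have hk' : k = rows.length := by omega
        rw [hk', List.getD_append_right _ _ _ _ (le_refl _), Nat.sub_self]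
        rw [hrowAeq]
        rfl
    · intro jn hjn
      have hjnlt : jn < (((Nn : Int) + 1) - 1).toNat := by omega
      have hjr1 : (1 : Int) ≤ 1 + (jn : Int) := by omega
      have hjr2 : 1 + (jn : Int) < (Nn : Int) + 1 := by omega
      have hgetrowA : (rows ++ [rowA]).getD i [] = rowA := by
        rw [← hlen, List.getD_append_right _ _ _ _ (le_refl _), Nat.sub_self]
        rfl
      have hfval : f (1 + (jn : Int)) = rowA.getD (jn + 1) 0 := by
        rw [← hrowBval _ hjr1 hjr2, ← hcell _ hjr1 hjr2, hrowAeq, List.singleton_append,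
          List.getD_cons_succ, ← PySem.List.pyGetD_natCast,
          PySem.List.pyGetD_map_pyRange_one _ 1 ((Nn : Int) + 1) jn 0 hjnlt]
      have hMnew : (((PySem.List.pyRange 1 ((Nn : Int) + 1)).map
          (fun j => min (PySem.List.pyGetD M (j - 1) 0) (PySem.List.pyGetD rowB (j - 1) 0 - ti))).getD jn 0)
          = min (PySem.List.pyGetD M ((1 + (jn : Int)) - 1) 0)
                (PySem.List.pyGetD rowB ((1 + (jn : Int)) - 1) 0 - ti) := by
        rw [← PySem.List.pyGetD_natCast, PySem.List.pyGetD_map_pyRange_one _ 1 ((Nn : Int) + 1) jn 0 hjnlt]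
      rw [hMnew, hrowBval _ hjr1 hjr2,
        show (1 + (jn : Int)) - 1 = ((jn : Nat) : Int) from by omega,
        PySem.List.pyGetD_natCast, hM jn hjn, pvMinFrom_succ,
        pvMinFrom_congr (pvVal songs (rows ++ [rowA]) jn) (pvVal songs rows jn) i hi
          (fun k hk => by unfold pvVal; rw [List.getD_append _ _ _ k (by omega)])]
      congr 1
      unfold pvVal
      rw [hgetrowA, hfval, hti]

-- the two loops, run from i = 1 to i = m, stay related
lemma pvEngine (songs : List (Int × Int)) (T : Int) (Nn : Nat) : ∀ m : Nat,
    ((PySem.List.pyRange 1 (1 + (m : Int))).foldl (aStep songs T (T + 1) (Nn : Int))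
        ([0 :: (PySem.List.pyGetD songs 0 ((0 : Int), (0 : Int))).1 :: List.replicate (Nn - 1) (T + 1)], 0)).2
      = ((PySem.List.pyRange 1 (1 + (m : Int))).foldl (bStep songs T (T + 1) (Nn : Int))
        (((PySem.List.pyGetD songs 0 ((0 : Int), (0 : Int))).1
            - (PySem.List.pyGetD songs 0 ((0 : Int), (0 : Int))).2)
          :: List.replicate (Nn - 1) ((T + 1) - (PySem.List.pyGetD songs 0 ((0 : Int), (0 : Int))).2), 0)).2
    ∧ pvInv songs Nn (1 + m)
        ((PySem.List.pyRange 1 (1 + (m : Int))).foldl (aStep songs T (T + 1) (Nn : Int))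
          ([0 :: (PySem.List.pyGetD songs 0 ((0 : Int), (0 : Int))).1 :: List.replicate (Nn - 1) (T + 1)], 0)).1
        ((PySem.List.pyRange 1 (1 + (m : Int))).foldl (bStep songs T (T + 1) (Nn : Int))
          (((PySem.List.pyGetD songs 0 ((0 : Int), (0 : Int))).1
              - (PySem.List.pyGetD songs 0 ((0 : Int), (0 : Int))).2)
            :: List.replicate (Nn - 1) ((T + 1) - (PySem.List.pyGetD songs 0 ((0 : Int), (0 : Int))).2), 0)).1 := by
  intro m
  induction m with
  | zero =>
    rw [show (1 : Int) + ((0 : Nat) : Int) = 1 from by omega, PySem.List.pyRange_one_eq_nil (le_refl 1)]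
    refine ⟨rfl, rfl, ?_, ?_⟩
    · intro k hk
      have hk0 : k = 0 := by omega
      subst hk0
      rfl
    · intro jn hjn
      unfold pvMinFrom pvVal
      cases jn with
      | zero =>
        simp only [Nat.add_zero, List.range_one, List.foldl_cons, List.foldl_nil, min_self,
          Nat.cast_zero, List.getD_cons_zero, List.getD_cons_succ, Nat.zero_add]
      | succ p =>
        have hp : p < Nn - 1 := by omega
        simp only [Nat.add_zero, List.range_one, List.foldl_cons, List.foldl_nil, min_self,
          Nat.cast_zero, List.getD_cons_zero, List.getD_cons_succ]
        rw [List.getD_replicate _ hp, List.getD_replicate _ hp]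
  | succ m ih =>
    obtain ⟨hbest, hinv⟩ := ih
    have hcast : (1 : Int) + ((m + 1 : Nat) : Int) = (1 + (m : Int)) + 1 := by push_cast; ring
    have hle : (1 : Int) ≤ 1 + (m : Int) := by omega
    rw [hcast, PySem.List.pyRange_one_succ_right hle, List.foldl_append, List.foldl_append,
      List.foldl_cons, List.foldl_nil, List.foldl_cons, List.foldl_nil]
    set pA := (PySem.List.pyRange 1 (1 + (m : Int))).foldl (aStep songs T (T + 1) (Nn : Int))
        ([0 :: (PySem.List.pyGetD songs 0 ((0 : Int), (0 : Int))).1 :: List.replicate (Nn - 1) (T + 1)], 0) with hpA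
    set pB := (PySem.List.pyRange 1 (1 + (m : Int))).foldl (bStep songs T (T + 1) (Nn : Int))
        (((PySem.List.pyGetD songs 0 ((0 : Int), (0 : Int))).1
            - (PySem.List.pyGetD songs 0 ((0 : Int), (0 : Int))).2)
          :: List.replicate (Nn - 1) ((T + 1) - (PySem.List.pyGetD songs 0 ((0 : Int), (0 : Int))).2), 0) with hpB
    have hstep := pvStepOk songs T Nn (1 + m) pA.1 pB.1 pA.2 (by omega) hinv
    rw [show ((1 + m : Nat) : Int) = 1 + (m : Int) from by push_cast; ring] at hstep
    have hidx : 1 + (m + 1) = (1 + m) + 1 := by omega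
    rw [hidx, ← @Prod.mk.eta _ _ pA, ← @Prod.mk.eta _ _ pB, ← hbest]
    exact hstep

-- the loops of the two ports produce the same answer (range written as the ports write it)
lemma pvEngineFinal (songs : List (Int × Int)) (T : Int) (Nn : Nat) (h : 1 ≤ Nn) :
    ((PySem.List.pyRange 1 (Nn : Int)).foldl (aStep songs T (T + 1) (Nn : Int))
        ([0 :: (PySem.List.pyGetD songs 0 ((0 : Int), (0 : Int))).1 :: List.replicate (Nn - 1) (T + 1)], 0)).2
      = ((PySem.List.pyRange 1 (Nn : Int)).foldl (bStep songs T (T + 1) (Nn : Int))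
        (((PySem.List.pyGetD songs 0 ((0 : Int), (0 : Int))).1
            - (PySem.List.pyGetD songs 0 ((0 : Int), (0 : Int))).2)
          :: List.replicate (Nn - 1) ((T + 1) - (PySem.List.pyGetD songs 0 ((0 : Int), (0 : Int))).2), 0)).2 := by
  have he := pvEngine songs T Nn (Nn - 1)
  rw [show (1 : Int) + ((Nn - 1 : Nat) : Int) = (Nn : Int) from by omega] at he
  exact he.1

-- the song list built by A's comprehension is B's zip (under Pre_)
lemma pvSongsEq (duration tone : List Int) (h : duration.length ≤ tone.length) :
    (PySem.List.pyRange 0 (duration.length : Int)).map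
      (fun i => (PySem.List.pyGetD duration i 0, PySem.List.pyGetD tone i 0))
      = duration.zip tone := by
  rw [PySem.List.pyRange_zero_natCast, List.map_map]
  apply List.ext_getElem
  · simp only [List.length_map, List.length_range, List.length_zip]
    omega
  · intro n h1 h2
    simp only [List.getElem_map, List.getElem_range, Function.comp_apply, List.getElem_zip]
    have hn : n < duration.length := by simpa using h1
    rw [PySem.List.pyGetD_natCast, PySem.List.pyGetD_natCast,
      List.getD_eq_getElem duration 0 hn, List.getD_eq_getElem tone 0 (by omega)]

-- ===== VERDICT (by name: the statement is the Claim_ definition above) =====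
theorem maxSongs_spec : Claim_equal_maxSongs := by
  intro duration tone T _ hPre
  obtain ⟨hne, hlen⟩ := hPre
  unfold Spec_maxSongs
  simp only [maxSongs, maxSongs_alt]
  rw [pvSongsEq duration tone hlen]
  exact pvEngineFinal (PySem.List.sorted (duration.zip tone) (fun s => s.2)) T
    duration.length (List.length_pos_of_ne_nil hne)
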